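-- pv_equiv track=rewrite | github.com/IgorZyktin/MediaStorageSystem | browser/utils_browser.py | extend_tags_with_synonyms
-- ===== SOURCE A (Python) =====
-- from typing import List, Tuple, Set, Dict
--
-- def extend_tags_with_synonyms(given_tags: Set[str],
--                               given_synonyms: Dict[str, List[str]]
--                               ) -> Set[str]:
--     """Mutate given tags by adding synonyms to them.
--     """
--     sets = [set(x) for x in given_synonyms.values()]
--
--     resulting_tags = set()
--
--     for tag in list(given_tags):
--         resulting_tags.add(tag)
--
--         for entry in sets:
--             if tag in entry:
--                 resulting_tags.update(entry)
--
--     return resulting_tags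
-- ===== SOURCE B (Python) =====
-- from typing import List, Tuple, Set, Dict
--
-- def extend_tags_with_synonyms(given_tags: Set[str],
--                               given_synonyms: Dict[str, List[str]]
--                               ) -> Set[str]:
--     """Mutate given tags by adding synonyms to them.
--
--     Builds an inverted index word -> all synonym-group members once,
--     so the per-tag inner scan over all groups disappears.
--     """
--     index: Dict[str, List[str]] = {}
--     for group in given_synonyms.values():
--         for word in set(group):
--             index.setdefault(word, []).extend(group)
--
--     resulting_tags = set()
--     for tag in given_tags:
--         resulting_tags.add(tag)
--         resulting_tags.update(index.get(tag, ()))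
--
--     return resulting_tags
-- ===== Notes on version B (the rewrite author's own statement) =====
-- stated objective: faster
-- what changed: Instead of scanning every synonym group once per tag, B builds an inverted index word -> concatenated members of the groups containing it in one pass, then extends the tag set by a single dictionary lookup per tag.
import Mathlib
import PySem

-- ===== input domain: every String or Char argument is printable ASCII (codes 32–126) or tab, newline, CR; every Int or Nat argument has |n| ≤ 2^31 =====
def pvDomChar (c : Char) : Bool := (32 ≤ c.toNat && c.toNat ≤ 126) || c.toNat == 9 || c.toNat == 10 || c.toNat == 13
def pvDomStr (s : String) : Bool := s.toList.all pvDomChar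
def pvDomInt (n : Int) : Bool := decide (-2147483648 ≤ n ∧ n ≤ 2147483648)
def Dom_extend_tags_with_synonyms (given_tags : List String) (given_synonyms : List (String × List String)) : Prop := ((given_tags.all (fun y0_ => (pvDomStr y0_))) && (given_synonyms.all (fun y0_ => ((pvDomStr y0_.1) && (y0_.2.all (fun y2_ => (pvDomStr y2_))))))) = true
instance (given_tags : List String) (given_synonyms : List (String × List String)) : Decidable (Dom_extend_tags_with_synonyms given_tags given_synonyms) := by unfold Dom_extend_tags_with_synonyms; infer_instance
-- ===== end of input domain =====

-- ===== PORT A =====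
-- A's inner scan: for each tag, test membership in every group-set and union the hits.
def extend_tags_with_synonyms (given_tags : List String) (given_synonyms : List (String × List String)) : List String :=
  let sets : List (PySem.Set String) := given_synonyms.map (fun kv => PySem.Set.ofList kv.2)
  given_tags.foldl
    (fun resulting_tags tag =>
      sets.foldl
        (fun r entry => if PySem.Set.contains entry tag then PySem.Set.update r entry else r)
        (PySem.Set.add resulting_tags tag))
    PySem.Set.empty

-- ===== PORT B =====
-- B: one pass builds an inverted index word -> concatenation of the groups containing it;
-- then each tag costs a single lookup. (Faster by the mechanism stated in the header; the
-- timing label is the check's measurement.)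
def pvIndex_extend_tags_with_synonyms (given_synonyms : List (String × List String)) : PySem.Dict String (List String) :=
  given_synonyms.foldl
    (fun idx kv =>
      (PySem.Set.ofList kv.2).foldl
        (fun idx word => idx.insert word (idx.getD word [] ++ kv.2))
        idx)
    PySem.Dict.empty

def extend_tags_with_synonyms_alt (given_tags : List String) (given_synonyms : List (String × List String)) : List String :=
  let index := pvIndex_extend_tags_with_synonyms given_synonyms
  given_tags.foldl
    (fun resulting_tags tag =>
      PySem.Set.update (PySem.Set.add resulting_tags tag) (index.getD tag []))
    PySem.Set.empty

-- ===== PRECONDITION & SPEC =====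
def Spec_extend_tags_with_synonyms (given_tags : List String) (given_synonyms : List (String × List String)) (out : List String) : Prop := out = extend_tags_with_synonyms_alt given_tags given_synonyms
instance (given_tags : List String) (given_synonyms : List (String × List String)) (out : List String) : Decidable (Spec_extend_tags_with_synonyms given_tags given_synonyms out) := by unfold Spec_extend_tags_with_synonyms; infer_instance

-- ===== CLAIM (what is proved, stated in full; the proofs are below) =====
def Claim_equal_extend_tags_with_synonyms : Prop := ∀ (given_tags : List String) (given_synonyms : List (String × List String)), Dom_extend_tags_with_synonyms given_tags given_synonyms → Spec_extend_tags_with_synonyms given_tags given_synonyms (extend_tags_with_synonyms given_tags given_synonyms)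

-- ===== LEMMAS AND PROOFS =====

-- updating with set(xs) is updating with xs
lemma update_ofList (r : PySem.Set String) (xs : List String) :
    PySem.Set.update r (PySem.Set.ofList xs) = PySem.Set.update r xs := by
  rw [PySem.Set.update_eq_append_filter, PySem.Set.update_eq_append_filter, PySem.Set.ofList_ofList]

-- A's inner loop is one update with the concatenation of the matching group-sets
lemma foldl_if_update (tag : String) (L : List (PySem.Set String)) (r : PySem.Set String) :
    L.foldl (fun r entry => if PySem.Set.contains entry tag then PySem.Set.update r entry else r) r
      = PySem.Set.update r ((L.filter (fun e => PySem.Set.contains e tag)).flatten) := by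
  induction L generalizing r with
  | nil => simp [PySem.Set.update_nil]
  | cons e L ih =>
    rw [List.foldl_cons, List.filter_cons]
    by_cases h : PySem.Set.contains e tag = true
    · rw [if_pos h, if_pos h, ih, List.flatten_cons, PySem.Set.update_append]
    · rw [if_neg h, if_neg h, ih]

-- one group's pass over the index changes the entry of tag iff tag is in the group
lemma index_step (g : List String) (tag : String) (ws : List String) (hn : ws.Nodup)
    (idx : PySem.Dict String (List String)) :
    (ws.foldl (fun idx word => idx.insert word (idx.getD word [] ++ g)) idx).getD tag []
      = idx.getD tag [] ++ (if tag ∈ ws then g else []) := by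
  induction ws generalizing idx with
  | nil => simp
  | cons w ws ih =>
    simp only [List.foldl_cons]
    rcases List.nodup_cons.mp hn with ⟨hw, hn'⟩
    by_cases h : tag = w
    · subst h
      rw [ih hn', PySem.Dict.getD_insert_self]
      simp [hw]
    · rw [ih hn', PySem.Dict.getD_insert]
      simp [h]

-- the index entry of tag is the concatenation of the groups containing tag, in order
lemma index_getD (tag : String) (syns : List (String × List String))
    (idx : PySem.Dict String (List String)) :
    (syns.foldl
        (fun idx kv =>
          (PySem.Set.ofList kv.2).foldl (fun idx word => idx.insert word (idx.getD word [] ++ kv.2)) idx)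
        idx).getD tag []
      = idx.getD tag [] ++ (((syns.map (·.2)).filter (fun g => decide (tag ∈ g))).flatten) := by
  induction syns generalizing idx with
  | nil => simp
  | cons kv syns ih =>
    simp only [List.foldl_cons, List.map_cons, List.filter_cons]
    rw [ih, index_step kv.2 tag (PySem.Set.ofList kv.2) (PySem.Set.nodup_ofList kv.2)]
    by_cases h : tag ∈ kv.2
    · simp [h, PySem.Set.mem_ofList, List.append_assoc]
    · simp [h, PySem.Set.mem_ofList]

-- updating with a flattened list of set()s is updating with the flattened raw lists
lemma update_flatten_ofList (r : PySem.Set String) (L : List (List String)) :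
    PySem.Set.update r ((L.map PySem.Set.ofList).flatten) = PySem.Set.update r L.flatten := by
  induction L generalizing r with
  | nil => rfl
  | cons g L ih =>
    simp only [List.map_cons, List.flatten_cons]
    rw [PySem.Set.update_append, PySem.Set.update_append, update_ofList, ih]

-- the per-tag steps of the two programs agree
lemma step_eq (tag : String) (syns : List (String × List String)) (r : PySem.Set String) :
    ((syns.map (fun kv => PySem.Set.ofList kv.2)).foldl
        (fun r entry => if PySem.Set.contains entry tag then PySem.Set.update r entry else r)
        (PySem.Set.add r tag))
      = PySem.Set.update (PySem.Set.add r tag)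
          ((pvIndex_extend_tags_with_synonyms syns).getD tag []) := by
  rw [foldl_if_update, pvIndex_extend_tags_with_synonyms, index_getD]
  rw [PySem.Dict.getD_empty, List.nil_append]
  have hmap : (syns.map (fun kv => PySem.Set.ofList kv.2)).filter (fun e => PySem.Set.contains e tag)
      = ((syns.map (·.2)).filter (fun g => decide (tag ∈ g))).map PySem.Set.ofList := by
    induction syns with
    | nil => rfl
    | cons kv syns ih =>
      simp only [List.map_cons, List.filter_cons]
      simp only [PySem.Set.contains_eq_listContains] at ih
      simp at ih
      by_cases h : tag ∈ kv.2
      · simp [h, PySem.Set.mem_ofList, ih]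
      · simp [h, PySem.Set.mem_ofList, ih]
  rw [hmap, update_flatten_ofList]

-- ===== VERDICT (by name: the statement is the Claim_ definition above) =====
theorem extend_tags_with_synonyms_spec : Claim_equal_extend_tags_with_synonyms := by
  intro given_tags given_synonyms _
  unfold Spec_extend_tags_with_synonyms extend_tags_with_synonyms extend_tags_with_synonyms_alt
  simp only []
  congr 1
  funext r tag
  exact step_eq tag given_synonyms r
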